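-- pv_equiv track=rewrite | github.com/ykzhang0126/SemanticCAP | etc/generate_post_train_dna_seq/generate_access_dna_seq/preprocess.py | pad_to_1280
-- ===== SOURCE A (Python) =====
-- def pad_to_1280(dna):
--     while len(dna) > 1280:
--         dna = dna[1: len(dna)]
--         if len(dna) > 1280:
--             dna = dna[0: len(dna) - 1]
--
--     dna = 'S' + dna[1: len(dna) - 1] + 'E'
--     while len(dna) < 1280:
--         dna = 'P' + dna
--         if len(dna) < 1280:
--             dna = dna + 'P'
--     assert 'S' in dna
--     assert 'E' in dna
--     return dna
-- ===== SOURCE B (Python) =====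
-- def pad_to_1280(dna):
--     n = len(dna)
--     if n > 1280:
--         k = n - 1280
--         dna = dna[(k + 1) // 2 : n - k // 2]
--     core = 'S' + dna[1:-1] + 'E'
--     p = 1280 - len(core)
--     if p > 0:
--         core = 'P' * ((p + 1) // 2) + core + 'P' * (p // 2)
--     return core
-- ===== Notes on version B (the rewrite author's own statement) =====
-- stated objective: faster
-- what changed: A trims and pads one character per loop iteration with string re-concatenations (quadratic); B computes the front/back trim and pad counts arithmetically and builds the result with one slice and two multiplied pad strings.
import Mathlib
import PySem

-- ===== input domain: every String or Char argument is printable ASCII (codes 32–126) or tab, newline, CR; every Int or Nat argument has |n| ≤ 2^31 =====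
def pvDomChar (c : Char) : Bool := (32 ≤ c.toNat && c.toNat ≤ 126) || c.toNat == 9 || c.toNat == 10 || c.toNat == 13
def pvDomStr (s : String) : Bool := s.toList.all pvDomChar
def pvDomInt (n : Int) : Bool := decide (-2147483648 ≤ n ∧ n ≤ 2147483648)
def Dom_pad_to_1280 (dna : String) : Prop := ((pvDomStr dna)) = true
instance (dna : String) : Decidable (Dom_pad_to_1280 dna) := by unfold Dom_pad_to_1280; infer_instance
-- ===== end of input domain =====

-- B replaces A's two one-char-at-a-time while loops by arithmetically computed trim/pad
-- counts and a single slice/concatenation (objective: faster).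

-- ===== PORT A =====
-- dna[1:len(dna)] is the tail (cited by the ports' termination proofs)
lemma pvSliceTail (s : List Char) : PySem.List.slice s (some 1) (some (s.length : Int)) = s.tail := by
  cases s with
  | nil => rfl
  | cons a l =>
    simp [PySem.List.slice, PySem.List.clampIdx]
    split_ifs <;> omega

-- dna[0:len(dna)-1] drops the last character (cited by the ports' termination proofs)
lemma pvSliceInit (s : List Char) :
    PySem.List.slice s (some 0) (some ((s.length : Int) - 1)) = s.dropLast := by
  cases s with
  | nil => rfl
  | cons a l =>
    simp [PySem.List.slice, PySem.List.clampIdx, List.dropLast_eq_take]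
    split_ifs <;> omega

-- first while loop: peel one char from the front, then (if still too long) one from the back
def pvTrimLoopA (s : List Char) : List Char :=
  if h : s.length > 1280 then
    let s1 := PySem.List.slice s (some 1) (some (s.length : Int))
    let s2 := if s1.length > 1280
              then PySem.List.slice s1 (some 0) (some ((s1.length : Int) - 1))
              else s1
    pvTrimLoopA s2
  else s
termination_by s.length
decreasing_by
  simp only [pvSliceTail, pvSliceInit]
  split <;> simp <;> omega

-- second while loop: prepend 'P', then (if still too short) append 'P'
def pvPadLoopA (s : List Char) : List Char :=
  if h : s.length < 1280 then
    let s1 := 'P' :: s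
    let s2 := if s1.length < 1280 then s1 ++ ['P'] else s1
    pvPadLoopA s2
  else s
termination_by 1280 - s.length
decreasing_by
  split <;> (simp only [List.length_cons, List.length_append]; omega)

-- the two asserts always succeed ('S' and 'E' are inserted and never removed), so they are no-ops
def pad_to_1280 (dna : String) : String :=
  let t := pvTrimLoopA dna.toList
  let core := 'S' :: PySem.List.slice t (some 1) (some ((t.length : Int) - 1)) ++ ['E']
  String.ofList (pvPadLoopA core)

-- ===== PORT B =====
def pad_to_1280_alt (dna : String) : String :=
  let s := dna.toList
  let n : Int := s.length
  let t := if n > 1280 then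
             let k := n - 1280
             PySem.List.slice s (some (PySem.Int.floordiv (k + 1) 2)) (some (n - PySem.Int.floordiv k 2))
           else s
  let core := 'S' :: PySem.List.slice t (some 1) (some (-1)) ++ ['E']
  let p : Int := 1280 - core.length
  let out := if p > 0 then
               PySem.List.pyRepeat ['P'] (PySem.Int.floordiv (p + 1) 2) ++ core
                 ++ PySem.List.pyRepeat ['P'] (PySem.Int.floordiv p 2)
             else core
  String.ofList out

-- ===== PRECONDITION & SPEC =====
def Spec_pad_to_1280 (dna : String) (out : String) : Prop := out = pad_to_1280_alt dna
instance (dna : String) (out : String) : Decidable (Spec_pad_to_1280 dna out) := by unfold Spec_pad_to_1280; infer_instance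

-- ===== CLAIM (what is proved, stated in full; the proofs are below) =====
def Claim_equal_pad_to_1280 : Prop := ∀ (dna : String), Dom_pad_to_1280 dna → Spec_pad_to_1280 dna (pad_to_1280 dna)

-- ===== LEMMAS AND PROOFS =====

-- dna[1:len(dna)-1] = tail + dropLast (A's spelling of the bound)
lemma pvSliceMidA (t : List Char) :
    PySem.List.slice t (some 1) (some ((t.length : Int) - 1)) = t.tail.dropLast := by
  cases t with
  | nil => rfl
  | cons a l =>
    simp [PySem.List.slice, PySem.List.clampIdx, List.dropLast_eq_take]
    split_ifs <;> omega

-- dna[1:-1] = tail + dropLast (B's spelling of the bound)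
lemma pvSliceMidB (t : List Char) :
    PySem.List.slice t (some 1) (some (-1)) = t.tail.dropLast := by
  cases t with
  | nil => rfl
  | cons a l =>
    simp [PySem.List.slice, PySem.List.clampIdx, List.dropLast_eq_take]
    split_ifs <;> omega

-- closed form of A's trim loop: drop ceil(k/2) from the front, keep 1280 (k = excess)
set_option maxRecDepth 4000 in
lemma pvTrimLoopA_eq : ∀ (n : Nat) (s : List Char), s.length = n →
    pvTrimLoopA s = (s.drop ((s.length - 1280 + 1) / 2)).take 1280 := by
  intro n
  induction n using Nat.strong_induction_on with
  | _ n ih =>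
    intro s hs
    rw [pvTrimLoopA.eq_def]
    split
    case isFalse h =>
      have h1 : s.length - 1280 = 0 := by omega
      simp [h1, List.take_of_length_le (by omega : s.length ≤ 1280)]
    case isTrue h =>
      simp only [pvSliceTail]
      by_cases h2 : s.tail.length > 1280
      · rw [if_pos h2, pvSliceInit]
        have h2' : 1280 < s.length - 1 := by simpa using h2
        have hlen : s.tail.dropLast.length = s.length - 2 := by
          rw [List.length_dropLast, List.length_tail]
          omega
        rw [ih (s.length - 2) (by omega) _ hlen]
        rw [hlen]
        have hd : s.tail.dropLast = (s.drop 1).take (s.length - 2) := by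
          rw [List.dropLast_eq_take, List.drop_one]
          congr 1
          simp; omega
        rw [hd, List.drop_take, List.drop_drop, List.take_take]
        have e1 : 1 + (s.length - 2 - 1280 + 1) / 2 = (s.length - 1280 + 1) / 2 := by omega
        have e2 : min 1280 (s.length - 2 - (s.length - 2 - 1280 + 1) / 2) = 1280 := by omega
        rw [e2, e1]
      · rw [if_neg h2]
        have h2' : s.length - 1 ≤ 1280 := by simpa using h2
        have hlen : s.tail.length = s.length - 1 := by simp
        rw [ih (s.length - 1) (by omega) _ hlen]
        rw [hlen]
        have e1 : (s.length - 1 - 1280 + 1) / 2 = 0 := by omega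
        have e2 : (s.length - 1280 + 1) / 2 = 1 := by omega
        rw [e1, e2, List.drop_zero, ← List.drop_one]
-- PySem.Int.floordiv_natCast specialised to the literal divisor 2
lemma pvFdivTwo (m : Nat) : PySem.Int.floordiv (m : Int) 2 = ((m / 2 : Nat) : Int) := by
  exact_mod_cast PySem.Int.floordiv_natCast m 2

-- a replicate of 'P' commutes past a leading 'P'
lemma pvRepCons (k : Nat) (l : List Char) :
    List.replicate k 'P' ++ 'P' :: l = 'P' :: (List.replicate k 'P' ++ l) := by
  induction k with
  | zero => rfl
  | succ k ih => simp [List.replicate_succ, ih]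

-- closed form of A's pad loop: ceil(p/2) 'P's in front, floor(p/2) behind (p = deficit)
lemma pvPadLoopA_eq : ∀ (n : Nat) (s : List Char), 1280 - s.length = n →
    pvPadLoopA s = List.replicate ((1280 - s.length + 1) / 2) 'P' ++ s
      ++ List.replicate ((1280 - s.length) / 2) 'P' := by
  intro n
  induction n using Nat.strong_induction_on with
  | _ n ih =>
    intro s hs
    rw [pvPadLoopA.eq_def]
    split
    case isFalse h =>
      have h1 : 1280 - s.length = 0 := by omega
      simp [h1]
    case isTrue h =>
      simp only [List.length_cons]
      by_cases h2 : s.length + 1 < 1280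
      · rw [if_pos h2]
        have hlen : 1280 - ('P' :: s ++ ['P']).length = 1280 - s.length - 2 := by
          simp only [List.length_cons, List.length_append, List.length_nil]
          omega
        rw [ih (1280 - s.length - 2) (by omega) _ hlen, hlen]
        have e1 : (1280 - s.length - 2 + 1) / 2 + 1 = (1280 - s.length + 1) / 2 := by omega
        have e2 : (1280 - s.length - 2) / 2 + 1 = (1280 - s.length) / 2 := by omega
        rw [← e1, ← e2]
        simp only [List.replicate_succ, List.cons_append, List.append_assoc,
          List.nil_append, pvRepCons]
      · rw [if_neg h2]
        rw [pvPadLoopA.eq_def]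
        rw [dif_neg (show ¬('P' :: s).length < 1280 by
          simp only [List.length_cons]; omega)]
        have e1 : (1280 - s.length + 1) / 2 = 1 := by omega
        have e2 : (1280 - s.length) / 2 = 0 := by omega
        rw [e1, e2]
        simp

-- ===== VERDICT (by name: the statement is the Claim_ definition above) =====
theorem pad_to_1280_spec : Claim_equal_pad_to_1280 := by
  intro dna _
  unfold Spec_pad_to_1280 pad_to_1280 pad_to_1280_alt
  simp only []
  set s := dna.toList with hsdef
  -- the two trimmed strings agree
  have htrim : pvTrimLoopA s
      = (if ((s.length : Int)) > 1280 then
           PySem.List.slice s (some (PySem.Int.floordiv (((s.length : Int)) - 1280 + 1) 2))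
             (some (((s.length : Int)) - PySem.Int.floordiv (((s.length : Int)) - 1280) 2))
         else s) := by
    rw [pvTrimLoopA_eq s.length s rfl]
    split
    case isTrue h =>
      have hk : ((s.length : Int)) - 1280 = ((s.length - 1280 : Nat) : Int) := by omega
      have hk1 : ((s.length : Int)) - 1280 + 1 = ((s.length - 1280 + 1 : Nat) : Int) := by omega
      rw [hk1, hk, pvFdivTwo, pvFdivTwo]
      have hb : ((s.length : Int)) - ((s.length - 1280 : Nat) / 2 : Nat)
          = ((s.length - (s.length - 1280) / 2 : Nat) : Int) := by omega
      rw [hb, PySem.List.slice_natCast]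
      congr 1
      omega
    case isFalse h =>
      have h1 : s.length - 1280 = 0 := by omega
      rw [h1]
      simp [List.take_of_length_le (by omega : s.length ≤ 1280)]
  rw [← htrim]
  set t := pvTrimLoopA s with htdef
  have htl : t.length ≤ 1280 := by
    rw [htdef, pvTrimLoopA_eq s.length s rfl]
    simp
  -- the two cores agree
  rw [pvSliceMidA, ← pvSliceMidB]
  set core := 'S' :: PySem.List.slice t (some 1) (some (-1)) ++ ['E'] with hcdef
  have hcl : core.length ≤ 1280 := by
    rw [hcdef, pvSliceMidB]
    simp
    omega
  -- the two paddings agree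
  rw [pvPadLoopA_eq (1280 - core.length) core rfl]
  by_cases hp : (1280 : Int) - core.length > 0
  · rw [if_pos hp]
    have h1 : ((1280 : Int) - core.length) + 1 = ((1280 - core.length + 1 : Nat) : Int) := by omega
    have h2 : ((1280 : Int) - core.length) = ((1280 - core.length : Nat) : Int) := by omega
    rw [h1, h2, pvFdivTwo, pvFdivTwo]
    simp only [PySem.List.pyRepeat_singleton, Int.toNat_natCast]
  · rw [if_neg hp]
    have h1 : 1280 - core.length = 0 := by omega
    rw [h1]
    simp
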